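-- pv_equiv track=rewrite | github.com/lhjin1103/CS372_NLP | hw5/CS372_HW5_submission_20180526/CS372_HW5_code_20180526.py | find_pronoun
-- ===== SOURCE A (Python) =====
-- def find_pronoun(text, word, offset):
--     '''
--     returns the word number of the pronoun
--     '''
--     offset = int(offset)
--     counter = 0
--     for j, w in enumerate(text):
--         counter += len(w) + 1
--         if counter > offset:
--             if word in w:
--                 return j
--     return 0
-- ===== SOURCE B (Python) =====
-- def find_pronoun(text, word, offset):
--     '''
--     returns the word number of the pronoun
--     '''
--     offset = int(offset)
--     prefix = []
--     total = 0
--     for w in text: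
--         total += len(w) + 1
--         prefix.append(total)
--     # binary search: first index where prefix[index] > offset
--     lo, hi = 0, len(prefix)
--     while lo < hi:
--         mid = (lo + hi) // 2
--         if prefix[mid] > offset:
--             hi = mid
--         else:
--             lo = mid + 1
--     for j in range(lo, len(text)):
--         if word in text[j]:
--             return j
--     return 0
-- ===== Notes on version B (the rewrite author's own statement) =====
-- stated objective: alternative
-- what changed: A's single pass that accumulates a running counter and tests each word once the counter exceeds the offset is replaced by precomputing a prefix-sum list of inclusive cumulative lengths, binary-searching it for the first index exceeding the offset, and then scanning forward from that index for the substring match.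
import Mathlib
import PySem

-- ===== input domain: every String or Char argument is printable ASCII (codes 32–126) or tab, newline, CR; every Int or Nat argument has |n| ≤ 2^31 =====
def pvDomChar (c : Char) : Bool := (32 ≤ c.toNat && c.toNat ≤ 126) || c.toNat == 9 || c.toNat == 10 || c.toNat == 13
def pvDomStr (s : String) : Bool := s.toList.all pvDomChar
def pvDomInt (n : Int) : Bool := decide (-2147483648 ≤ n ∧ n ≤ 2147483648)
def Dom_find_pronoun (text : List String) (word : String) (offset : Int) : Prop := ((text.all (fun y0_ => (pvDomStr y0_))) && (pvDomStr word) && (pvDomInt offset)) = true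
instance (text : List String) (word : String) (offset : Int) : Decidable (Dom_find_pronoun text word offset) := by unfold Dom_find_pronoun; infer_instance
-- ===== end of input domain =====

-- B replaces A's single counting-and-matching pass by a prefix-sum list plus a hand-rolled
-- binary search for the first word whose inclusive cumulative length exceeds the offset,
-- then a forward scan for the substring match (objective: alternative decomposition).

-- ===== PORT A =====
-- the loop 'for j, w in enumerate(text): counter += len(w)+1; if counter > offset: if word in w: return j'
def find_pronoun_go (word : String) (offset : Int) : List String → Int → Int → Int
  | [], _, _ => 0
  | w :: rest, j, counter =>
    let counter := counter + (PySem.Str.len w : Int) + 1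
    if counter > offset then
      if PySem.Str.isIn word w then j
      else find_pronoun_go word offset rest (j + 1) counter
    else find_pronoun_go word offset rest (j + 1) counter

def find_pronoun (text : List String) (word : String) (offset : Int) : Int :=
  find_pronoun_go word offset text 0 0

-- ===== PORT B =====
-- 'for w in text: total += len(w)+1; prefix.append(total)'
def pvBuildPrefix : List String → Int → List Int
  | [], _ => []
  | w :: rest, total =>
    let t := total + (PySem.Str.len w : Int) + 1
    t :: pvBuildPrefix rest t

-- 'while lo < hi: mid = (lo+hi)//2; …'.  prefix[mid] is ported as getD mid 0: mid < hi ≤ len(prefix)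
-- always holds, so the Python indexing never raises and the default is never used.  The fuel
-- argument (initially hi - lo, which strictly shrinks each iteration) only makes the loop total.
def pvBSearchGo (pref : List Int) (offset : Int) : Nat → Nat → Nat → Nat
  | 0, lo, _ => lo
  | fuel + 1, lo, hi =>
    if lo < hi then
      let mid := (lo + hi) / 2
      if pref.getD mid 0 > offset then pvBSearchGo pref offset fuel lo mid
      else pvBSearchGo pref offset fuel (mid + 1) hi
    else lo

-- 'for j in range(lo, len(text)): if word in text[j]: return j' (fuel = number of remaining indices)
def pvScanFromGo (text : List String) (word : String) : Nat → Nat → Int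
  | 0, _ => 0
  | fuel + 1, j =>
    if h : j < text.length then
      if PySem.Str.isIn word text[j] then (j : Int)
      else pvScanFromGo text word fuel (j + 1)
    else 0

def find_pronoun_alt (text : List String) (word : String) (offset : Int) : Int :=
  let pref := pvBuildPrefix text 0
  let start := pvBSearchGo pref offset pref.length 0 pref.length
  pvScanFromGo text word (text.length - start) start

-- ===== PRECONDITION & SPEC =====
def Spec_find_pronoun (text : List String) (word : String) (offset : Int) (out : Int) : Prop := out = find_pronoun_alt text word offset
instance (text : List String) (word : String) (offset : Int) (out : Int) : Decidable (Spec_find_pronoun text word offset out) := by unfold Spec_find_pronoun; infer_instance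

-- ===== CLAIM (what is proved, stated in full; the proofs are below) =====
def Claim_equal_find_pronoun : Prop := ∀ (text : List String) (word : String) (offset : Int), Dom_find_pronoun text word offset → Spec_find_pronoun text word offset (find_pronoun text word offset)

-- ===== LEMMAS AND PROOFS =====

-- abstract "first match from position j", shared target of both ports
def pvFirstMatch (word : String) : List String → Int → Int
  | [], _ => 0
  | w :: rest, j => if PySem.Str.isIn word w then j else pvFirstMatch word rest (j + 1)

-- index (within the remaining list) of the first word whose inclusive cumulative length exceeds offset
def pvStart (offset : Int) : List String → Int → Nat
  | [], _ => 0
  | w :: rest, c =>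
    if c + (PySem.Str.len w : Int) + 1 > offset then 0
    else pvStart offset rest (c + (PySem.Str.len w : Int) + 1) + 1

theorem pvGo_of_gt (word : String) (offset : Int) (l : List String) (j c : Int)
    (h : c > offset) : find_pronoun_go word offset l j c = pvFirstMatch word l j := by
  induction l generalizing j c with
  | nil => rfl
  | cons w rest ih =>
    have hlen : (0 : Int) ≤ (PySem.Str.len w : Int) := Int.natCast_nonneg _
    simp only [find_pronoun_go, pvFirstMatch]
    rw [if_pos (by omega)]
    split
    · rfl
    · exact ih _ _ (by omega)

theorem pvGo_eq (word : String) (offset : Int) (l : List String) (j c : Int) :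
    find_pronoun_go word offset l j c
      = pvFirstMatch word (l.drop (pvStart offset l c)) (j + (pvStart offset l c : Int)) := by
  induction l generalizing j c with
  | nil => simp [find_pronoun_go, pvFirstMatch, pvStart]
  | cons w rest ih =>
    simp only [find_pronoun_go, pvStart]
    by_cases h : c + (PySem.Str.len w : Int) + 1 > offset
    · rw [if_pos h, if_pos h]
      simp only [List.drop_zero, Nat.cast_zero, add_zero, pvFirstMatch]
      split
      · rfl
      · exact pvGo_of_gt word offset rest (j + 1) _ h
    · rw [if_neg h, if_neg h]
      rw [ih (j + 1) _]
      have : (j + 1) + (pvStart offset rest (c + (PySem.Str.len w : Int) + 1) : Int)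
          = j + ((pvStart offset rest (c + (PySem.Str.len w : Int) + 1) + 1 : Nat) : Int) := by
        push_cast; ring
      rw [this]
      rfl

theorem pvBuildPrefix_length (l : List String) (c : Int) :
    (pvBuildPrefix l c).length = l.length := by
  induction l generalizing c with
  | nil => rfl
  | cons w rest ih => simp [pvBuildPrefix, ih]

theorem pvBuildPrefix_lb (l : List String) (c : Int) (j : Nat) (hj : j < l.length) :
    c ≤ (pvBuildPrefix l c).getD j 0 := by
  induction l generalizing c j with
  | nil => simp at hj
  | cons w rest ih =>
    have hlen : (0 : Int) ≤ (PySem.Str.len w : Int) := Int.natCast_nonneg _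
    cases j with
    | zero =>
          simp only [pvBuildPrefix, List.getD_cons_zero]
          omega
    | succ j' =>
      simp only [pvBuildPrefix, List.getD_cons_succ]
      have := ih (c + (PySem.Str.len w : Int) + 1) j' (by simpa using hj)
      omega

theorem pvBuildPrefix_mono (l : List String) (c : Int) (i j : Nat) (hij : i ≤ j)
    (hj : j < l.length) :
    (pvBuildPrefix l c).getD i 0 ≤ (pvBuildPrefix l c).getD j 0 := by
  induction l generalizing c i j with
  | nil => simp at hj
  | cons w rest ih =>
    cases i with
    | zero =>
      cases j with
      | zero => exact le_refl _
      | succ j' =>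
        simp only [pvBuildPrefix, List.getD_cons_zero, List.getD_cons_succ]
        have hlen : (0 : Int) ≤ (PySem.Str.len w : Int) := Int.natCast_nonneg _
        have := pvBuildPrefix_lb rest (c + (PySem.Str.len w : Int) + 1) j' (by simpa using hj)
        omega
    | succ i' =>
      cases j with
      | zero => omega
      | succ j' =>
        simp only [pvBuildPrefix, List.getD_cons_succ]
        exact ih _ i' j' (by omega) (by simpa using hj)

-- pvStart is characterised by the prefix list: everything before it is ≤ offset, it itself (if in range) is > offset
theorem pvStart_spec (offset : Int) (l : List String) (c : Int) :
    pvStart offset l c ≤ l.length ∧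
    (∀ i, i < pvStart offset l c → (pvBuildPrefix l c).getD i 0 ≤ offset) ∧
    (pvStart offset l c < l.length → (pvBuildPrefix l c).getD (pvStart offset l c) 0 > offset) := by
  induction l generalizing c with
  | nil => simp [pvStart]
  | cons w rest ih =>
    by_cases h : c + (PySem.Str.len w : Int) + 1 > offset
    · refine ⟨?_, ?_, ?_⟩
      · simp only [pvStart, if_pos h, List.length_cons]
        omega
      · intro i hi
        simp only [pvStart, if_pos h] at hi
        omega
      · intro _
        simp only [pvStart, if_pos h, pvBuildPrefix, List.getD_cons_zero]
        exact h
    · obtain ⟨h1, h2, h3⟩ := ih (c + (PySem.Str.len w : Int) + 1)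
      refine ⟨?_, ?_, ?_⟩
      · simp only [pvStart, if_neg h, List.length_cons]; omega
      · intro i hi
        simp only [pvStart, if_neg h] at hi
        cases i with
        | zero =>
          simp only [pvBuildPrefix, List.getD_cons_zero]
          omega
        | succ i' =>
          simp only [pvBuildPrefix, List.getD_cons_succ]
          exact h2 i' (by omega)
      · intro hlt
        simp only [pvStart, if_neg h] at hlt ⊢
        simp only [pvBuildPrefix, List.getD_cons_succ]
        exact h3 (by simpa using hlt)

theorem pvBSearch_spec (pref : List Int) (offset : Int) (fuel lo hi : Nat)
    (hfuel : hi - lo ≤ fuel) (hlh : lo ≤ hi) (hhn : hi ≤ pref.length)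
    (hmono : ∀ i j, i ≤ j → j < pref.length → pref.getD i 0 ≤ pref.getD j 0)
    (hlow : ∀ i, i < lo → pref.getD i 0 ≤ offset)
    (hhigh : ∀ i, hi ≤ i → i < pref.length → pref.getD i 0 > offset) :
    (∀ i, i < pvBSearchGo pref offset fuel lo hi → pref.getD i 0 ≤ offset) ∧
    (pvBSearchGo pref offset fuel lo hi < pref.length →
      pref.getD (pvBSearchGo pref offset fuel lo hi) 0 > offset) ∧
    pvBSearchGo pref offset fuel lo hi ≤ pref.length := by
  induction fuel generalizing lo hi with
  | zero =>
    have : lo = hi := by omega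
    simp only [pvBSearchGo]
    exact ⟨hlow, fun hlt => hhigh lo (by omega) hlt, by omega⟩
  | succ fuel ih =>
    by_cases h : lo < hi
    · rw [pvBSearchGo, if_pos h]
      by_cases hmid : pref.getD ((lo + hi) / 2) 0 > offset
      · rw [if_pos hmid]
        exact ih lo ((lo + hi) / 2) (by omega) (by omega) (by omega) hlow
          (fun i hmi hin => lt_of_lt_of_le hmid (hmono _ i (by omega) hin))
      · rw [if_neg hmid]
        exact ih ((lo + hi) / 2 + 1) hi (by omega) (by omega) hhn
          (fun i hi' => le_trans (hmono i ((lo + hi) / 2) (by omega) (by omega)) (by omega)) hhigh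
    · rw [pvBSearchGo, if_neg h]
      have : lo = hi := by omega
      exact ⟨hlow, fun hlt => hhigh lo (by omega) hlt, by omega⟩

theorem pvBSearch_eq_start (text : List String) (offset : Int) :
    pvBSearchGo (pvBuildPrefix text 0) offset (pvBuildPrefix text 0).length 0
        (pvBuildPrefix text 0).length
      = pvStart offset text 0 := by
  set pref := pvBuildPrefix text 0 with hpref
  have hn : pref.length = text.length := pvBuildPrefix_length text 0
  obtain ⟨b1, b2, b3⟩ := pvBSearch_spec pref offset pref.length 0 pref.length (by omega)
    (by omega) (le_refl _)
    (fun i j hij hj => pvBuildPrefix_mono text 0 i j hij (by omega))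
    (fun i hi => by omega) (fun i hi hin => by omega)
  obtain ⟨s1, s2, s3⟩ := pvStart_spec offset text 0
  rw [← hpref] at s2 s3
  set r := pvBSearchGo pref offset pref.length 0 pref.length
  set s := pvStart offset text 0
  rcases lt_trichotomy r s with hlt | heq | hgt
  · have := s2 r hlt
    have := b2 (by omega)
    omega
  · exact heq
  · have := b1 s hgt
    have := s3 (by omega)
    omega

theorem pvScanFrom_eq (text : List String) (word : String) (fuel j : Nat)
    (hfuel : text.length - j ≤ fuel) :
    pvScanFromGo text word fuel j = pvFirstMatch word (text.drop j) (j : Int) := by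
  induction fuel generalizing j with
  | zero =>
    rw [pvScanFromGo, List.drop_eq_nil_of_le (by omega)]
    rfl
  | succ fuel ih =>
    by_cases h : j < text.length
    · rw [pvScanFromGo, dif_pos h, List.drop_eq_getElem_cons h]
      simp only [pvFirstMatch]
      split
      · rfl
      · rw [ih (j + 1) (by omega)]
        push_cast
        rfl
    · rw [pvScanFromGo, dif_neg h, List.drop_eq_nil_of_le (by omega)]
      rfl

-- ===== VERDICT (by name: the statement is the Claim_ definition above) =====
theorem find_pronoun_spec : Claim_equal_find_pronoun := by
  intro text word offset _
  show find_pronoun text word offset = find_pronoun_alt text word offset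
  show find_pronoun_go word offset text 0 0
      = pvScanFromGo text word
          (text.length - pvBSearchGo (pvBuildPrefix text 0) offset
              (pvBuildPrefix text 0).length 0 (pvBuildPrefix text 0).length)
          (pvBSearchGo (pvBuildPrefix text 0) offset
              (pvBuildPrefix text 0).length 0 (pvBuildPrefix text 0).length)
  rw [pvGo_eq, pvBSearch_eq_start, pvScanFrom_eq text word _ _ (by omega)]
  simp
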